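-- pv_equiv track=rewrite | github.com/Hmbown/Bachbot | bachbot/composition/generators/pattern_fill.py | _generate_bass_candidates
-- ===== SOURCE A (Python) =====
-- RANGES = {"Soprano": (60, 81), "Alto": (55, 74), "Tenor": (48, 69), "Bass": (36, 64)}
--
-- def _generate_bass_candidates(
--     bass_pc_options: list[int],
--     target_bass: int,
--     tenor_ceiling: int = 69,
--     max_candidates: int = 20,
-- ) -> list[int]:
--     """Generate bass MIDI candidates sorted by proximity to target."""
--     low, high = RANGES["Bass"]
--     cands = []
--     for pc in bass_pc_options:
--         for midi in range(low, high + 1):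
--             if midi % 12 == pc and midi < tenor_ceiling:
--                 cands.append(midi)
--     cands.sort(key=lambda m: (abs(m - target_bass), m))
--     return cands[:max_candidates]
-- ===== SOURCE B (Python) =====
-- RANGES = {"Soprano": (60, 81), "Alto": (55, 74), "Tenor": (48, 69), "Bass": (36, 64)}
--
-- def _generate_bass_candidates(
--     bass_pc_options: list[int],
--     target_bass: int,
--     tenor_ceiling: int = 69,
--     max_candidates: int = 20,
-- ) -> list[int]:
--     """Generate bass MIDI candidates sorted by proximity to target."""
--     # count requested pitch classes once
--     cnt = {}
--     for pc in bass_pc_options: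
--         cnt[pc] = cnt.get(pc, 0) + 1
--     low, high = RANGES["Bass"]
--     hi_lim = min(high, tenor_ceiling - 1)
--     # one ascending pass over the playable range, split around the target
--     lo, hi = [], []
--     for m in range(low, hi_lim + 1):
--         block = [m] * cnt.get(m % 12, 0)
--         if m <= target_bass:
--             lo.extend(block)
--         else:
--             hi.extend(block)
--     # merge the two halves by distance to the target (no sort needed)
--     rlo = lo[::-1]
--     i = j = 0
--     merged = []
--     while i < len(rlo) or j < len(hi):
--         if j >= len(hi) or (i < len(rlo) and target_bass - rlo[i] <= hi[j] - target_bass):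
--             merged.append(rlo[i])
--             i += 1
--         else:
--             merged.append(hi[j])
--             j += 1
--     return merged[:max_candidates]
-- ===== Notes on version B (the rewrite author's own statement) =====
-- stated objective: faster
-- what changed: Instead of scanning the whole Bass range per pitch class and then sorting by (distance, value), B counts the requested pitch classes once, makes a single ascending pass over the playable range splitting it around the target, and produces the ordered result by a two-pointer merge of the two halves by distance to the target - no sort at all.
import Mathlib
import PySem

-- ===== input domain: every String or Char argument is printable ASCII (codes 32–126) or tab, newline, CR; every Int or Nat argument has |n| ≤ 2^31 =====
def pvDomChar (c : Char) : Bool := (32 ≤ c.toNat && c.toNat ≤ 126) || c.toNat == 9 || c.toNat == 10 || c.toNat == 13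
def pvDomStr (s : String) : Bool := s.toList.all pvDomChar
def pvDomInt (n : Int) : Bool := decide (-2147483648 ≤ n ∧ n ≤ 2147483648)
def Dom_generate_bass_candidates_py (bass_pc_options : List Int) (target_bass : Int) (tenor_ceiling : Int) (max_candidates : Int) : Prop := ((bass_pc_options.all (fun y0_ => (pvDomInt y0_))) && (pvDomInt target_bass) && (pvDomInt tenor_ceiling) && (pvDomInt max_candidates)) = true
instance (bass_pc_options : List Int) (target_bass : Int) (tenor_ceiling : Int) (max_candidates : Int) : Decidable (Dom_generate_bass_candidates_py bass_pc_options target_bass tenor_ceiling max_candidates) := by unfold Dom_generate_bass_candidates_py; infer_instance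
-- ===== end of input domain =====

-- B drops the sort entirely: it counts the requested pitch classes once, walks the playable
-- range in one ascending pass split around the target, and merges the two halves by distance
-- to the target (two-pointer merge), producing the same list as A's scan-and-sort.

-- ===== PORT A =====
def generate_bass_candidates_py (bass_pc_options : List Int) (target_bass : Int) (tenor_ceiling : Int) (max_candidates : Int) : List Int :=
  let low : Int := 36
  let high : Int := 64
  let cands : List Int :=
    bass_pc_options.foldl (fun cands pc =>
      (PySem.List.pyRange low (high + 1) 1).foldl (fun cands midi =>
        if PySem.Int.mod midi 12 = pc ∧ midi < tenor_ceiling then cands ++ [midi]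
        else cands) cands) []
  let cands := PySem.List.sorted2 cands (fun m => |m - target_bass|) (fun m => m)
  PySem.List.slice cands none (some max_candidates)

-- ===== PORT B =====
-- the two-pointer while loop of Source B, consuming the reversed low half and the high half
def bassMerge (t : Int) : List Int → List Int → List Int
  | [], hs => hs
  | l :: ls, [] => l :: bassMerge t ls []
  | l :: ls, h :: hs =>
    if t - l ≤ h - t then l :: bassMerge t ls (h :: hs)
    else h :: bassMerge t (l :: ls) hs

def generate_bass_candidates_py_alt (bass_pc_options : List Int) (target_bass : Int) (tenor_ceiling : Int) (max_candidates : Int) : List Int :=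
  let cnt : PySem.Dict Int Int :=
    bass_pc_options.foldl (fun d pc => d.modify pc 0 (· + 1)) PySem.Dict.empty
  let low : Int := 36
  let high : Int := 64
  let hiLim : Int := min high (tenor_ceiling - 1)
  let s : List Int × List Int :=
    (PySem.List.pyRange low (hiLim + 1) 1).foldl (fun s m =>
      let block := PySem.List.pyRepeat [m] (cnt.getD (PySem.Int.mod m 12) 0)
      if m ≤ target_bass then (s.1 ++ block, s.2) else (s.1, s.2 ++ block)) ([], [])
  -- lo[::-1] is exactly List.reverse
  let merged := bassMerge target_bass s.1.reverse s.2
  PySem.List.slice merged none (some max_candidates)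

-- ===== PRECONDITION & SPEC =====
def Spec_generate_bass_candidates_py (bass_pc_options : List Int) (target_bass : Int) (tenor_ceiling : Int) (max_candidates : Int) (out : List Int) : Prop := out = generate_bass_candidates_py_alt bass_pc_options target_bass tenor_ceiling max_candidates
instance (bass_pc_options : List Int) (target_bass : Int) (tenor_ceiling : Int) (max_candidates : Int) (out : List Int) : Decidable (Spec_generate_bass_candidates_py bass_pc_options target_bass tenor_ceiling max_candidates out) := by unfold Spec_generate_bass_candidates_py; infer_instance

-- ===== CLAIM (what is proved, stated in full; the proofs are below) =====
def Claim_equal_generate_bass_candidates_py : Prop := ∀ (bass_pc_options : List Int) (target_bass : Int) (tenor_ceiling : Int) (max_candidates : Int), Dom_generate_bass_candidates_py bass_pc_options target_bass tenor_ceiling max_candidates → Spec_generate_bass_candidates_py bass_pc_options target_bass tenor_ceiling max_candidates (generate_bass_candidates_py bass_pc_options target_bass tenor_ceiling max_candidates)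

-- ===== LEMMAS AND PROOFS =====

-- A's nested loops flattened: per pitch class, the filtered scan of 36..64.
theorem candsA_eq (opts : List Int) (tc : Int) (acc : List Int) :
    opts.foldl (fun cands pc =>
        (PySem.List.pyRange 36 65 1).foldl (fun cands midi =>
          if PySem.Int.mod midi 12 = pc ∧ midi < tc then cands ++ [midi]
          else cands) cands) acc =
      acc ++ opts.flatMap (fun pc =>
        (PySem.List.pyRange 36 65 1).filter
          (fun m => decide (PySem.Int.mod m 12 = pc ∧ m < tc))) := by
  induction opts generalizing acc with
  | nil => simp
  | cons pc rest ih =>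
    simp only [List.foldl_cons, List.flatMap_cons]
    rw [PySem.List.foldl_append_ite_eq_filter, ih, List.append_assoc]

-- B's single split pass over the range.
theorem split_pass (ms : List Int) (g : Int → List Int) (t : Int) (a b : List Int) :
    ms.foldl (fun (s : List Int × List Int) m =>
        if m ≤ t then (s.1 ++ g m, s.2) else (s.1, s.2 ++ g m)) (a, b) =
      (a ++ (ms.filter (fun m => decide (m ≤ t))).flatMap g,
       b ++ (ms.filter (fun m => !decide (m ≤ t))).flatMap g) := by
  induction ms generalizing a b with
  | nil => simp
  | cons m rest ih =>
    by_cases h : m ≤ t <;>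
      simp [h, ih, List.append_assoc]

-- a 0/c-sum over pitch classes
theorem sum_map_ite_count (opts : List Int) (v : Int) (Q : Prop) [Decidable Q] :
    (opts.map (fun pc => if v = pc ∧ Q then 1 else 0)).sum =
      if Q then opts.count v else 0 := by
  induction opts with
  | nil => simp
  | cons pc rest ih =>
    simp only [List.map_cons, List.sum_cons, ih, List.count_cons]
    by_cases hQ : Q
    · by_cases hv : v = pc
      · subst hv; simp [hQ]; omega
      · simp [hQ, hv, Ne.symm hv]
    · simp [hQ]

-- a sum over a duplicate-free list picking out one element
theorem sum_map_ite_mem (l : List Int) (hnd : l.Nodup) (x : Int) (c : Int → Nat) :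
    (l.map (fun m => if m = x then c m else 0)).sum = if x ∈ l then c x else 0 := by
  induction l with
  | nil => simp
  | cons m rest ih =>
    rcases List.nodup_cons.mp hnd with ⟨hm, hrest⟩
    by_cases hmx : m = x
    · subst hmx
      simp [ih hrest, hm]
    · simp [hmx, ih hrest, Ne.symm hmx]

-- counting: A's candidate bag equals B's per-midi bag.
theorem perm_cands (opts : List Int) (tc : Int) :
    (opts.flatMap (fun pc =>
        (PySem.List.pyRange 36 65 1).filter
          (fun m => decide (PySem.Int.mod m 12 = pc ∧ m < tc)))).Perm
      ((PySem.List.pyRange 36 (min 64 (tc - 1) + 1) 1).flatMap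
        (fun m => List.replicate (opts.count (PySem.Int.mod m 12)) m)) := by
  rw [List.perm_iff_count]
  intro x
  rw [List.count_flatMap, List.count_flatMap]
  have hrange : List.count x (PySem.List.pyRange 36 65 1) =
      if 36 ≤ x ∧ x < 65 then 1 else 0 := by
    by_cases hx : 36 ≤ x ∧ x < 65
    · rw [if_pos hx]
      exact List.count_eq_one_of_mem (PySem.List.nodup_pyRange_one 36 65)
        (PySem.List.mem_pyRange_one.mpr hx)
    · rw [if_neg hx, List.count_eq_zero]
      intro hmem
      exact hx (PySem.List.mem_pyRange_one.mp hmem)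
  have hL : (opts.map (List.count x ∘ fun pc =>
        (PySem.List.pyRange 36 65 1).filter
          (fun m => decide (PySem.Int.mod m 12 = pc ∧ m < tc)))) =
      opts.map (fun pc =>
        if PySem.Int.mod x 12 = pc ∧ (x < tc ∧ 36 ≤ x ∧ x < 65) then 1 else 0) := by
    apply List.map_congr_left
    intro pc _
    simp only [Function.comp_apply]
    by_cases hq : PySem.Int.mod x 12 = pc ∧ x < tc
    · rw [List.count_filter (by simp only [decide_eq_true_eq]; exact hq), hrange]
      by_cases hx : 36 ≤ x ∧ x < 65
      · rw [if_pos hx, if_pos ⟨hq.1, hq.2, hx.1, hx.2⟩]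
      · rw [if_neg hx, if_neg (fun h => hx ⟨h.2.2.1, h.2.2.2⟩)]
    · rw [List.count_eq_zero.mpr (fun hmem => hq (by
        have := (List.mem_filter.mp hmem).2
        simpa only [decide_eq_true_eq] using this))]
      exact (if_neg (fun h => hq ⟨h.1, h.2.1⟩)).symm
  have hR : ((PySem.List.pyRange 36 (min 64 (tc - 1) + 1) 1).map
        (List.count x ∘ fun m => List.replicate (opts.count (PySem.Int.mod m 12)) m)) =
      (PySem.List.pyRange 36 (min 64 (tc - 1) + 1) 1).map
        (fun m => if m = x then opts.count (PySem.Int.mod m 12) else 0) := by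
    apply List.map_congr_left
    intro m _
    simp [List.count_replicate]
  rw [hL, hR, sum_map_ite_count, sum_map_ite_mem _ (PySem.List.nodup_pyRange_one _ _)]
  by_cases hc : x < tc ∧ 36 ≤ x ∧ x < 65
  · rw [if_pos hc, if_pos (PySem.List.mem_pyRange_one.mpr (by omega))]
  · rw [if_neg hc, if_neg (fun hmem => hc (by
      have := PySem.List.mem_pyRange_one.mp hmem; omega))]

-- merge returns exactly the elements of its two inputs.
theorem bassMerge_perm (t : Int) (ls hs : List Int) :
    (bassMerge t ls hs).Perm (ls ++ hs) := by
  fun_induction bassMerge t ls hs with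
  | case1 hs => simp
  | case2 l ls ih => simpa using ih.cons l
  | case3 l ls h hs hc ih => simpa using ih.cons l
  | case4 l ls h hs hc ih =>
    refine ((ih.cons h).trans ?_)
    simpa using (List.perm_middle (a := h) (l₁ := l :: ls) (l₂ := hs)).symm

theorem mem_bassMerge (t x : Int) (ls hs : List Int) :
    x ∈ bassMerge t ls hs ↔ x ∈ ls ∨ x ∈ hs := by
  rw [(bassMerge_perm t ls hs).mem_iff, List.mem_append]

-- merge is ordered by (distance to t, value).
theorem bassMerge_pairwise (t : Int) (ls hs : List Int)
    (hl : ∀ x ∈ ls, x ≤ t) (hh : ∀ x ∈ hs, t < x)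
    (pl : ls.Pairwise (fun a b => b ≤ a)) (ph : hs.Pairwise (fun a b => a ≤ b)) :
    (bassMerge t ls hs).Pairwise
      (fun a b => |a - t| < |b - t| ∨ (|a - t| = |b - t| ∧ a ≤ b)) := by
  have habs_le : ∀ x : Int, x ≤ t → |x - t| = t - x := fun x hx => by
    rw [abs_of_nonpos (by omega)]; ring
  have habs_gt : ∀ x : Int, t < x → |x - t| = x - t := fun x hx =>
    abs_of_nonneg (by omega)
  fun_induction bassMerge t ls hs with
  | case1 hs =>
    refine ph.imp_of_mem ?_
    intro a b ha hb hab
    have h1 := habs_gt a (hh a ha); have h2 := habs_gt b (hh b hb)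
    omega
  | case2 l ls ih =>
    rw [List.pairwise_cons]
    have hll := hl l (by simp)
    refine ⟨?_, ih (fun x hx => hl x (by simp [hx])) hh (pl.tail) ph⟩
    intro y hy
    have hy' : y ∈ ls := by simpa using (mem_bassMerge t y ls []).mp hy
    have hyl : y ≤ l := (List.pairwise_cons.mp pl).1 y hy'
    have h1 := habs_le l hll; have h2 := habs_le y (hl y (by simp [hy']))
    omega
  | case3 l ls h hs hc ih =>
    rw [List.pairwise_cons]
    have hll := hl l (by simp)
    refine ⟨?_, ih (fun x hx => hl x (by simp [hx])) hh (pl.tail) ph⟩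
    intro y hy
    rcases (mem_bassMerge t y ls (h :: hs)).mp hy with hy' | hy'
    · have hyl : y ≤ l := (List.pairwise_cons.mp pl).1 y hy'
      have h1 := habs_le l hll; have h2 := habs_le y (hl y (by simp [hy']))
      omega
    · have hhy : h ≤ y := by
        rcases List.mem_cons.mp hy' with rfl | hy'' 
        · exact le_refl _
        · exact (List.pairwise_cons.mp ph).1 y hy''
      have h1 := habs_le l hll; have h2 := habs_gt y (hh y hy')
      omega
  | case4 l ls h hs hc ih =>
    rw [List.pairwise_cons]
    have hth := hh h (by simp)
    refine ⟨?_, ih hl (fun x hx => hh x (by simp [hx])) pl (ph.tail)⟩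
    intro y hy
    rcases (mem_bassMerge t y (l :: ls) hs).mp hy with hy' | hy'
    · have hyl : y ≤ l := by
        rcases List.mem_cons.mp hy' with rfl | hy''
        · exact le_refl _
        · exact (List.pairwise_cons.mp pl).1 y hy''
      have hll := hl l (by simp)
      have h1 := habs_gt h hth; have h2 := habs_le y (hl y hy')
      omega
    · have hhy : h ≤ y := (List.pairwise_cons.mp ph).1 y hy'
      have h1 := habs_gt h hth; have h2 := habs_gt y (hh y (by simp [hy']))
      omega

-- Python's tuple sort key (k1, k2) is the lexicographic single-key sort.
theorem sorted2_eq_sorted_lex (xs : List Int) (k1 k2 : Int → Int) :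
    PySem.List.sorted2 xs k1 k2 false =
      PySem.List.sorted xs (fun m => toLex (k1 m, k2 m)) false := by
  simp only [PySem.List.sorted2, PySem.List.sorted, Bool.false_eq_true, if_false]
  have hb : (fun a b : Int => decide (k1 a < k1 b) || (!decide (k1 b < k1 a) && decide (k2 a < k2 b))) =
      (fun a b : Int => decide (toLex (k1 a, k2 a) < toLex (k1 b, k2 b))) := by
    funext a b
    rcases lt_trichotomy (k1 a) (k1 b) with h | h | h <;>
      simp [Prod.Lex.lt_iff, h, not_lt_of_gt]
  rw [hb]

-- elements and order of the two halves of the split pass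
theorem flatMap_replicate_pairwise_le (l : List Int) (c : Int → Nat)
    (hp : l.Pairwise (· ≤ ·)) :
    (l.flatMap (fun m => List.replicate (c m) m)).Pairwise (· ≤ ·) := by
  rw [List.pairwise_flatMap]
  constructor
  · intro a _; rw [List.pairwise_replicate]; right; exact le_refl a
  · refine hp.imp_of_mem ?_
    intro a b _ _ hab x hx y hy
    rw [List.eq_of_mem_replicate hx, List.eq_of_mem_replicate hy]
    exact hab

theorem mem_flatMap_replicate (l : List Int) (c : Int → Nat) (x : Int) :
    x ∈ l.flatMap (fun m => List.replicate (c m) m) → x ∈ l := by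
  intro hx
  rcases List.mem_flatMap.mp hx with ⟨m, hm, hxm⟩
  rwa [List.eq_of_mem_replicate hxm]

-- the core fact: A's sorted candidate list IS B's merge.
theorem core_eq (opts : List Int) (tb tc : Int) :
    PySem.List.sorted2
      (opts.flatMap (fun pc =>
        (PySem.List.pyRange 36 65 1).filter
          (fun m => decide (PySem.Int.mod m 12 = pc ∧ m < tc))))
      (fun m => |m - tb|) (fun m => m) false =
    bassMerge tb
      ((((PySem.List.pyRange 36 (min 64 (tc - 1) + 1) 1).filter
          (fun m => decide (m ≤ tb))).flatMap
            (fun m => List.replicate (opts.count (PySem.Int.mod m 12)) m)).reverse)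
      (((PySem.List.pyRange 36 (min 64 (tc - 1) + 1) 1).filter
          (fun m => !decide (m ≤ tb))).flatMap
            (fun m => List.replicate (opts.count (PySem.Int.mod m 12)) m)) := by
  set candsA := opts.flatMap (fun pc =>
    (PySem.List.pyRange 36 65 1).filter
      (fun m => decide (PySem.Int.mod m 12 = pc ∧ m < tc))) with hcandsA
  set g := fun m : Int => List.replicate (opts.count (PySem.Int.mod m 12)) m with hg
  set rng := PySem.List.pyRange 36 (min 64 (tc - 1) + 1) 1 with hrng
  set lo := (rng.filter (fun m => decide (m ≤ tb))).flatMap g with hlo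
  set hi := (rng.filter (fun m => !decide (m ≤ tb))).flatMap g with hhi
  rw [sorted2_eq_sorted_lex]
  have hrngp : rng.Pairwise (· < ·) := PySem.List.pairwise_lt_pyRange_one _ _
  have hlo_le : ∀ x ∈ lo, x ≤ tb := by
    intro x hx
    have := mem_flatMap_replicate _ _ _ hx
    simpa using (List.mem_filter.mp this).2
  have hhi_gt : ∀ x ∈ hi, tb < x := by
    intro x hx
    have := mem_flatMap_replicate _ _ _ hx
    have h2 := (List.mem_filter.mp this).2
    simp only [Bool.not_eq_eq_eq_not, Bool.not_true, decide_eq_false_iff_not, not_le] at h2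
    exact h2
  have hlo_pw : lo.reverse.Pairwise (fun a b => b ≤ a) := by
    rw [List.pairwise_reverse]
    exact flatMap_replicate_pairwise_le _ _
      ((hrngp.filter _).imp le_of_lt)
  have hhi_pw : hi.Pairwise (fun a b => a ≤ b) :=
    flatMap_replicate_pairwise_le _ _ ((hrngp.filter _).imp le_of_lt)
  have hl_rev : ∀ x ∈ lo.reverse, x ≤ tb := fun x hx => hlo_le x (List.mem_reverse.mp hx)
  apply PySem.List.eq_of_perm_of_pairwise_le_of_injective
      (key := fun m : Int => toLex (|m - tb|, m))
  · intro a b hab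
    simpa using congrArg (fun x => (ofLex x).2) hab
  · refine (PySem.List.sorted_perm _ _ _).trans ?_
    refine ((perm_cands opts tc).trans ?_)
    refine ((List.filter_append_perm (fun m => decide (m ≤ tb)) rng).symm.flatMap
        (fun a _ => List.Perm.refl _)).trans ?_
    rw [List.flatMap_append]
    refine (List.Perm.append (lo.reverse_perm.symm) (List.Perm.refl hi)).trans ?_
    exact (bassMerge_perm tb lo.reverse hi).symm
  · exact PySem.List.sorted_pairwise _ _
  · refine (bassMerge_pairwise tb lo.reverse hi hl_rev hhi_gt hlo_pw hhi_pw).imp ?_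
    intro a b hab
    rw [Prod.Lex.le_iff]
    simpa using hab

-- ===== VERDICT (by name: the statement is the Claim_ definition above) =====
theorem generate_bass_candidates_py_spec : Claim_equal_generate_bass_candidates_py := by
  intro opts tb tc mc _
  unfold Spec_generate_bass_candidates_py
  simp only [generate_bass_candidates_py, generate_bass_candidates_py_alt]
  have hcnt : ∀ v : Int,
      (opts.foldl (fun d pc => d.modify pc 0 (· + 1)) PySem.Dict.empty).getD v 0 =
        (opts.count v : Int) := by
    intro v
    rw [PySem.Dict.getD_foldl_modify_add_one, PySem.Dict.getD_empty]
    ring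
  have hbody : (fun (s : List Int × List Int) m =>
        let block := PySem.List.pyRepeat [m]
          ((opts.foldl (fun d pc => d.modify pc 0 (· + 1)) PySem.Dict.empty).getD
            (PySem.Int.mod m 12) 0)
        if m ≤ tb then (s.1 ++ block, s.2) else (s.1, s.2 ++ block)) =
      (fun (s : List Int × List Int) m =>
        if m ≤ tb then (s.1 ++ List.replicate (opts.count (PySem.Int.mod m 12)) m, s.2)
        else (s.1, s.2 ++ List.replicate (opts.count (PySem.Int.mod m 12)) m)) := by
    funext s m
    simp [PySem.List.pyRepeat_singleton, hcnt]
  simp only [show (64 : Int) + 1 = 65 from by norm_num]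
  rw [candsA_eq, List.nil_append, hbody,
    split_pass (PySem.List.pyRange 36 (min 64 (tc - 1) + 1) 1)
      (fun m => List.replicate (opts.count (PySem.Int.mod m 12)) m) tb [] []]
  simp only [List.nil_append]
  rw [core_eq]
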